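-- pv_equiv track=rewrite | github.com/luccidnz/Sigilcraft | main.py | count_emotional_words
-- ===== SOURCE A (Python) =====
-- def count_emotional_words(text):
--     """Count emotional words in text"""
--     emotional_words = [
--         'love', 'peace', 'power', 'strength', 'healing', 'money', 'success', 'joy',
--         'happiness', 'protection', 'wisdom', 'clarity', 'abundance', 'prosperity',
--         'freedom', 'wealth', 'health', 'beauty', 'truth', 'light', 'divine', 'sacred',
--         'blessed', 'gratitude', 'manifestation', 'transformation', 'awakening', 'enlightenment'
--     ]
--
--     words = text.lower().split()
--     return sum(1 for word in words if word in emotional_words)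
-- ===== SOURCE B (Python) =====
-- EMOTIONAL = (
--     'love peace power strength healing money success joy '
--     'happiness protection wisdom clarity abundance prosperity '
--     'freedom wealth health beauty truth light divine sacred '
--     'blessed gratitude manifestation transformation awakening enlightenment'
-- ).split()
--
--
-- def count_emotional_words(text):
--     """Count emotional words in text"""
--     words = text.lower().split()
--     return sum(words.count(w) for w in EMOTIONAL)
-- ===== Notes on version B (the rewrite author's own statement) =====
-- stated objective: alternative
-- what changed: B inverts the traversal: instead of scanning every text word and testing membership in the 28-word list, it iterates over the fixed emotional-word list (kept as one space-separated string split once) and sums words.count(w) for each; correct because the list has no duplicates.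
import Mathlib
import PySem

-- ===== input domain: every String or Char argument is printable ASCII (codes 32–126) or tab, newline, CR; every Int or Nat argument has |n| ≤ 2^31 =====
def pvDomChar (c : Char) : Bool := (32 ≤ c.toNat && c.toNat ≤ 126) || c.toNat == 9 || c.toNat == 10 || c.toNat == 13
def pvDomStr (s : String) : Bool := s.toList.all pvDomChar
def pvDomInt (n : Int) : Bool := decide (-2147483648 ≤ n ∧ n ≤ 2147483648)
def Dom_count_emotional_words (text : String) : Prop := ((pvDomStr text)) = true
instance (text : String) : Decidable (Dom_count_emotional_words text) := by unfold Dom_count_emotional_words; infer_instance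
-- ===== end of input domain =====

-- B inverts the traversal: it iterates over the fixed duplicate-free word list summing each word's
-- occurrence count in the text, instead of scanning the text testing membership (alternative decomposition).

-- ===== PORT A =====
def emotionalWordsA : List String :=
  ["love", "peace", "power", "strength", "healing", "money", "success", "joy",
   "happiness", "protection", "wisdom", "clarity", "abundance", "prosperity",
   "freedom", "wealth", "health", "beauty", "truth", "light", "divine", "sacred",
   "blessed", "gratitude", "manifestation", "transformation", "awakening", "enlightenment"]

def count_emotional_words (text : String) : Int :=
  let words := PySem.Str.split₀ (PySem.Str.lower text)
  words.foldl (fun acc w => if emotionalWordsA.contains w then acc + 1 else acc) 0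

-- ===== PORT B =====
-- Source B keeps the lexicon as one space-separated string split once at module load
def emotionalB : List String :=
  PySem.Str.split₀
    ("love peace power strength healing money success joy " ++
     "happiness protection wisdom clarity abundance prosperity " ++
     "freedom wealth health beauty truth light divine sacred " ++
     "blessed gratitude manifestation transformation awakening enlightenment")

def count_emotional_words_alt (text : String) : Int :=
  let words := PySem.Str.split₀ (PySem.Str.lower text)
  (emotionalB.map (fun w => (words.count w : Int))).sum

-- ===== PRECONDITION & SPEC =====
def Spec_count_emotional_words (text : String) (out : Int) : Prop := out = count_emotional_words_alt text
instance (text : String) (out : Int) : Decidable (Spec_count_emotional_words text out) := by unfold Spec_count_emotional_words; infer_instance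

-- ===== CLAIM (what is proved, stated in full; the proofs are below) =====
def Claim_equal_count_emotional_words : Prop := ∀ (text : String), Dom_count_emotional_words text → Spec_count_emotional_words text (count_emotional_words text)

-- ===== LEMMAS AND PROOFS =====

-- countP of a disjunction of pointwise-disjoint Bool predicates is additive
theorem countP_or_disjoint {α : Type} (l : List α) (p q : α → Bool)
    (h : ∀ x ∈ l, ¬(p x = true ∧ q x = true)) :
    l.countP (fun x => p x || q x) = l.countP p + l.countP q := by
  induction l with
  | nil => simp
  | cons a l ih =>
    simp only [List.countP_cons, ih (fun x hx => h x (List.mem_cons_of_mem _ hx))]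
    have ha := h a List.mem_cons_self
    cases hp : p a <;> cases hq : q a <;> simp_all <;> omega

-- countP of membership in a duplicate-free list = sum of the individual counts
theorem countP_contains_eq_sum_counts (E : List String) (hE : E.Nodup) (l : List String) :
    (l.countP (fun w => E.contains w) : Int) = (E.map (fun w => (l.count w : Int))).sum := by
  induction E with
  | nil => simp
  | cons e E ih =>
    rcases List.nodup_cons.mp hE with ⟨he, hE'⟩
    have hpred : (fun w => (e :: E).contains w) = fun w => ((w == e) || E.contains w) := by
      funext w
      simp only [List.contains_cons]
    have hdisj : ∀ w ∈ l, ¬((w == e) = true ∧ E.contains w = true) := by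
      intro w _ ⟨h1, h2⟩
      exact he (by simpa [beq_iff_eq.mp h1] using h2)
    rw [hpred, countP_or_disjoint l _ _ hdisj]
    have hcount : l.countP (fun w => w == e) = l.count e := List.count_eq_countP.symm
    push_cast
    rw [hcount, ih hE']
    simp

set_option maxRecDepth 4000 in
theorem emotionalB_eq : emotionalB = emotionalWordsA := by decide

theorem count_emotional_words_spec : Claim_equal_count_emotional_words := by
  intro text _
  unfold Spec_count_emotional_words count_emotional_words count_emotional_words_alt
  simp only []
  set words := PySem.Str.split₀ (PySem.Str.lower text) with hw
  rw [PySem.List.foldl_if_add_one (fun w => emotionalWordsA.contains w) words 0, emotionalB_eq]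
  have hnodup : emotionalWordsA.Nodup := by decide
  have key := countP_contains_eq_sum_counts emotionalWordsA hnodup words
  omega
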